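-- pv_equiv track=rewrite | github.com/mtoc12/definitely3people | part3/utils.py | vectorize_sonnets
-- ===== SOURCE A (Python) =====
-- def sonnet_to_sequence(sonnet, word_library):
--     sequence = []
--     for line in sonnet:
--         for word in line:
--             sequence.append(word_library[word])
--         sequence.append(word_library['\n'])
-- #     sequence.append(word_library[ENDVALUE])
--     return sequence
--
-- def vectorize_sonnets(sonnets):
--     word_library = {'\n':0}#, ENDVALUE:1}
--     feat_library = {0:'\n'}#, 1:ENDVALUE}
--     num_features = 1#2
--     for sonnet in sonnets:
--         for line in sonnet:
--             for word in line:
--                 # Check if word is already in dictionary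
--                 if not word in word_library.keys():
--                     word_library[word] = num_features
--                     feat_library[num_features] = word
--                     num_features += 1
--
--     sequences = []
--     lengths = []
--     for sonnet in sonnets:
--         next_seq = sonnet_to_sequence(sonnet, word_library)
--         sequences += next_seq
--         lengths.append(len(next_seq))
--
--     return sequences, lengths, word_library, feat_library, num_features
-- ===== SOURCE B (Python) =====
-- def vectorize_sonnets(sonnets):
--     # Single fused pass: assign indices on first sight while vectorizing.
--     word_library = {'\n': 0}
--     feat_library = {0: '\n'}
--     num_features = 1
--     sequences = []
--     lengths = []
--     for sonnet in sonnets: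
--         seq = []
--         for line in sonnet:
--             for word in line:
--                 if word in word_library:
--                     idx = word_library[word]
--                 else:
--                     idx = num_features
--                     word_library[word] = idx
--                     feat_library[idx] = word
--                     num_features += 1
--                 seq.append(idx)
--             seq.append(word_library['\n'])
--         sequences += seq
--         lengths.append(len(seq))
--     return sequences, lengths, word_library, feat_library, num_features
-- ===== Notes on version B (the rewrite author's own statement) =====
-- stated objective: alternative
-- what changed: Fused A's two full traversals (an index-building pass followed by a separate vectorizing pass with a helper) into one single pass that assigns indices on first sight while emitting the sequence.
import Mathlib
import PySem

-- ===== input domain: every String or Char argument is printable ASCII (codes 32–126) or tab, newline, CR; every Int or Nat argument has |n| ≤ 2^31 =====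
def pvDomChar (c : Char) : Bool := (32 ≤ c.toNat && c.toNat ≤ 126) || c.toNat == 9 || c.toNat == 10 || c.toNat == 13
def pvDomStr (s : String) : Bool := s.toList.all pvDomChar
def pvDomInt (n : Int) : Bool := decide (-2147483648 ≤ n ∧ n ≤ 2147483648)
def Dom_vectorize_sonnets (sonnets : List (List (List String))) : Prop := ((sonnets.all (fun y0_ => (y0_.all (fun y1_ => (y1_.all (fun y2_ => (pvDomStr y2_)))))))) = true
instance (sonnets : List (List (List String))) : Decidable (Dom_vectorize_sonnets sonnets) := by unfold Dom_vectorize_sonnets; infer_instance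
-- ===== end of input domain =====

-- B fuses A's two full passes (build word index, then vectorize) into one pass; return values are identical.

-- ===== PORT A =====
-- pass-1 word step: assign a fresh index to an unseen word
def pvA_step (s : PySem.Dict String Int × PySem.Dict Int String × Int) (w : String) :
    PySem.Dict String Int × PySem.Dict Int String × Int :=
  if ¬ (w ∈ s.1.keys) then (s.1.insert w s.2.2, s.2.1.insert s.2.2 w, s.2.2 + 1) else s

-- helper sonnet_to_sequence; word_library[word] always succeeds after pass 1, ported as getD 0
def sonnet_to_sequence (sonnet : List (List String)) (wl : PySem.Dict String Int) : List Int :=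
  sonnet.foldl (fun seq line =>
    (line.foldl (fun s w => s ++ [wl.getD w 0]) seq) ++ [wl.getD "\n" 0]) []

def vectorize_sonnets (sonnets : List (List (List String))) :
    List Int × List Int × (List (String × Int)) × (List (Int × String)) × Int :=
  let lib := sonnets.foldl (fun s sonnet =>
      sonnet.foldl (fun s line => line.foldl pvA_step s) s)
    (PySem.Dict.ofList [("\n", (0 : Int))], PySem.Dict.ofList [((0 : Int), "\n")], (1 : Int))
  let sl := sonnets.foldl (fun acc sonnet =>
      let next_seq := sonnet_to_sequence sonnet lib.1
      (acc.1 ++ next_seq, acc.2 ++ [(next_seq.length : Int)])) ([], [])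
  (sl.1, sl.2, lib.1.items, lib.2.1.items, lib.2.2)

-- ===== PORT B =====
-- fused word step: look up, or assign a fresh index, and emit it
def pvB_word (st : (PySem.Dict String Int × PySem.Dict Int String × Int) × List Int)
    (w : String) : (PySem.Dict String Int × PySem.Dict Int String × Int) × List Int :=
  if st.1.1.contains w then (st.1, st.2 ++ [st.1.1.getD w 0])
  else ((st.1.1.insert w st.1.2.2, st.1.2.1.insert st.1.2.2 w, st.1.2.2 + 1), st.2 ++ [st.1.2.2])

def vectorize_sonnets_alt (sonnets : List (List (List String))) :
    List Int × List Int × (List (String × Int)) × (List (Int × String)) × Int :=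
  let fin := sonnets.foldl (fun acc sonnet =>
      let inner := sonnet.foldl (fun st line =>
          let st2 := line.foldl pvB_word st
          (st2.1, st2.2 ++ [st2.1.1.getD "\n" 0])) (acc.1, [])
      (inner.1, acc.2.1 ++ inner.2, acc.2.2 ++ [(inner.2.length : Int)]))
    ((PySem.Dict.ofList [("\n", (0 : Int))], PySem.Dict.ofList [((0 : Int), "\n")], (1 : Int)), [], [])
  (fin.2.1, fin.2.2, fin.1.1.items, fin.1.2.1.items, fin.1.2.2)

-- ===== PRECONDITION & SPEC =====
def Spec_vectorize_sonnets (sonnets : List (List (List String))) (out : List Int × List Int × (List (String × Int)) × (List (Int × String)) × Int) : Prop := out = vectorize_sonnets_alt sonnets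
instance (sonnets : List (List (List String))) (out : List Int × List Int × (List (String × Int)) × (List (Int × String)) × Int) : Decidable (Spec_vectorize_sonnets sonnets out) := by unfold Spec_vectorize_sonnets; infer_instance

-- ===== CLAIM (what is proved, stated in full; the proofs are below) =====
def Claim_equal_vectorize_sonnets : Prop := ∀ (sonnets : List (List (List String))), Dom_vectorize_sonnets sonnets → Spec_vectorize_sonnets sonnets (vectorize_sonnets sonnets)

-- ===== LEMMAS AND PROOFS =====

-- dictionary extension: every binding of d is still a binding of e
def pvExt (d e : PySem.Dict String Int) : Prop := ∀ k v, d.get? k = some v → e.get? k = some v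

theorem pvExt_refl (d : PySem.Dict String Int) : pvExt d d := fun _ _ h => h

theorem pvExt_trans {d e f : PySem.Dict String Int} (h1 : pvExt d e) (h2 : pvExt e f) : pvExt d f :=
  fun k v h => h2 k v (h1 k v h)

theorem pvExt_step (s : PySem.Dict String Int × PySem.Dict Int String × Int) (w : String) :
    pvExt s.1 (pvA_step s w).1 := by
  unfold pvA_step
  split
  · rename_i hmem
    intro k v h
    rcases eq_or_ne k w with rfl | hne
    · rw [(PySem.Dict.get?_eq_none_iff_not_mem_keys s.1 k).mpr hmem] at h
      cases h
    · rw [PySem.Dict.get?_insert_of_ne _ _ hne]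
      exact h
  · exact pvExt_refl _

theorem pvGet_after_step (s : PySem.Dict String Int × PySem.Dict Int String × Int) (w : String) :
    ∃ v, (pvA_step s w).1.get? w = some v := by
  unfold pvA_step
  split
  · exact ⟨s.2.2, PySem.Dict.get?_insert_self _ _ _⟩
  · rename_i h
    rw [not_not] at h
    cases hopt : s.1.get? w with
    | none => exact absurd ((PySem.Dict.get?_eq_none_iff_not_mem_keys s.1 w).mp hopt) (by simp [h])
    | some v => exact ⟨v, rfl⟩

theorem pvExt_foldl_gen {α : Type}
    (f : (PySem.Dict String Int × PySem.Dict Int String × Int) → α → (PySem.Dict String Int × PySem.Dict Int String × Int))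
    (hf : ∀ s a, pvExt s.1 (f s a).1) (l : List α)
    (s : PySem.Dict String Int × PySem.Dict Int String × Int) :
    pvExt s.1 (l.foldl f s).1 := by
  induction l generalizing s with
  | nil => exact pvExt_refl _
  | cons a l ih => exact pvExt_trans (hf s a) (ih (f s a))

theorem pvExt_foldl_words (l : List String) (s : PySem.Dict String Int × PySem.Dict Int String × Int) :
    pvExt s.1 (l.foldl pvA_step s).1 := pvExt_foldl_gen _ pvExt_step l s

theorem pvExt_foldl_son (son : List (List String)) (s : PySem.Dict String Int × PySem.Dict Int String × Int) :
    pvExt s.1 (son.foldl (fun s line => line.foldl pvA_step s) s).1 :=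
  pvExt_foldl_gen _ (fun s line => pvExt_foldl_words line s) son s

theorem pvExt_foldl_sons (sons : List (List (List String))) (s : PySem.Dict String Int × PySem.Dict Int String × Int) :
    pvExt s.1 (sons.foldl (fun s son => son.foldl (fun s line => line.foldl pvA_step s) s) s).1 :=
  pvExt_foldl_gen _ (fun s son => pvExt_foldl_son son s) sons s

theorem pvB_word_eq (s : PySem.Dict String Int × PySem.Dict Int String × Int) (q : List Int) (w : String) :
    pvB_word (s, q) w = (pvA_step s w, q ++ [(pvA_step s w).1.getD w 0]) := by
  unfold pvB_word pvA_step
  by_cases h : s.1.contains w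
  · simp [h, (PySem.Dict.contains_iff_mem_keys s.1 w).mp h]
  · have hmem : ¬ (w ∈ s.1.keys) := fun hm => h ((PySem.Dict.contains_iff_mem_keys s.1 w).mpr hm)
    simp [h, hmem, PySem.Dict.getD_insert_self]

theorem pvB_line (line : List String) (s : PySem.Dict String Int × PySem.Dict Int String × Int)
    (q : List Int) (D : PySem.Dict String Int)
    (hD : pvExt (line.foldl pvA_step s).1 D) :
    line.foldl pvB_word (s, q)
      = (line.foldl pvA_step s, q ++ line.map (fun w => D.getD w 0)) := by
  induction line generalizing s q with
  | nil => simp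
  | cons w ws ih =>
    have hD' : pvExt (ws.foldl pvA_step (pvA_step s w)).1 D := by simpa using hD
    obtain ⟨v, hv⟩ := pvGet_after_step s w
    have hDv : D.get? w = some v :=
      (pvExt_trans (pvExt_foldl_words ws (pvA_step s w)) hD') w v hv
    have hval : (pvA_step s w).1.getD w 0 = D.getD w 0 := by
      rw [PySem.Dict.getD_of_get?_eq_some _ _ hv, PySem.Dict.getD_of_get?_eq_some _ _ hDv]
    simp only [List.foldl_cons, pvB_word_eq, hval, ih _ _ hD', List.map_cons,
      List.append_assoc, List.singleton_append]

theorem pvNl_foldl_words (l : List String) (s : PySem.Dict String Int × PySem.Dict Int String × Int)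
    (hnl : s.1.get? "\n" = some 0) : (l.foldl pvA_step s).1.get? "\n" = some 0 :=
  pvExt_foldl_words l s _ _ hnl

theorem pvB_sonnet (son : List (List String)) (s : PySem.Dict String Int × PySem.Dict Int String × Int)
    (q : List Int) (D : PySem.Dict String Int)
    (hnl : s.1.get? "\n" = some 0)
    (hD : pvExt (son.foldl (fun s line => line.foldl pvA_step s) s).1 D) :
    son.foldl (fun st line =>
        let st2 := line.foldl pvB_word st
        (st2.1, st2.2 ++ [st2.1.1.getD "\n" 0])) (s, q)
      = (son.foldl (fun s line => line.foldl pvA_step s) s,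
         q ++ son.flatMap (fun line => line.map (fun w => D.getD w 0) ++ [D.getD "\n" 0])) := by
  induction son generalizing s q with
  | nil => simp
  | cons line ls ih =>
    have hD' : pvExt (ls.foldl (fun s line => line.foldl pvA_step s) (line.foldl pvA_step s)).1 D := by
      simpa using hD
    have hExt1 : pvExt (line.foldl pvA_step s).1 D :=
      pvExt_trans (pvExt_foldl_son ls (line.foldl pvA_step s)) hD'
    have hnl1 : (line.foldl pvA_step s).1.get? "\n" = some 0 := pvNl_foldl_words line s hnl
    have hnlD : D.get? "\n" = some 0 := hExt1 _ _ hnl1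
    have hgd1 : (line.foldl pvA_step s).1.getD "\n" 0 = 0 :=
      PySem.Dict.getD_of_get?_eq_some _ _ hnl1
    have hgdD : D.getD "\n" 0 = 0 := PySem.Dict.getD_of_get?_eq_some _ _ hnlD
    simp only [List.foldl_cons, pvB_line line s q D hExt1, hgd1,
      ih (line.foldl pvA_step s) (q ++ (line.map (fun w => D.getD w 0) ++ [(0:Int)])) hnl1 hD',
      List.flatMap_cons, hgdD, List.append_assoc]

theorem pvA_seq_eq (son : List (List String)) (D : PySem.Dict String Int) :
    sonnet_to_sequence son D
      = son.flatMap (fun line => line.map (fun w => D.getD w 0) ++ [D.getD "\n" 0]) := by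
  unfold sonnet_to_sequence
  simp only [PySem.List.foldl_append_singleton_eq_map, List.append_assoc]
  rw [show (fun (seq : List Int) (line : List String) =>
        seq ++ (line.map (fun w => D.getD w 0) ++ [D.getD "\n" 0]))
      = (fun (acc : List Int) (line : List String) =>
        acc ++ ((fun line => line.map (fun w => D.getD w 0) ++ [D.getD "\n" 0]) line)) from rfl,
    PySem.List.foldl_append_eq_flatMap]
  simp

theorem pvA_pass2 (sons : List (List (List String))) (L : PySem.Dict String Int)
    (a1 a2 : List Int) :
    sons.foldl (fun acc son =>
        let ns := sonnet_to_sequence son L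
        (acc.1 ++ ns, acc.2 ++ [(ns.length : Int)])) (a1, a2)
      = (a1 ++ sons.flatMap (fun son => sonnet_to_sequence son L),
         a2 ++ sons.map (fun son => ((sonnet_to_sequence son L).length : Int))) := by
  induction sons generalizing a1 a2 with
  | nil => simp
  | cons son rest ih => simp [ih]

theorem pvB_main (sons : List (List (List String)))
    (s : PySem.Dict String Int × PySem.Dict Int String × Int)
    (seqs lens : List Int) (hnl : s.1.get? "\n" = some 0) :
    sons.foldl (fun acc sonnet =>
        let inner := sonnet.foldl (fun st line =>
            let st2 := line.foldl pvB_word st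
            (st2.1, st2.2 ++ [st2.1.1.getD "\n" 0])) (acc.1, [])
        (inner.1, acc.2.1 ++ inner.2, acc.2.2 ++ [(inner.2.length : Int)])) (s, seqs, lens)
      = (sons.foldl (fun s son => son.foldl (fun s line => line.foldl pvA_step s) s) s,
         seqs ++ sons.flatMap (fun son =>
           sonnet_to_sequence son (sons.foldl (fun s son => son.foldl (fun s line => line.foldl pvA_step s) s) s).1),
         lens ++ sons.map (fun son =>
           ((sonnet_to_sequence son (sons.foldl (fun s son => son.foldl (fun s line => line.foldl pvA_step s) s) s).1).length : Int))) := by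
  induction sons generalizing s seqs lens with
  | nil => simp
  | cons son rest ih =>
    have hD : pvExt (son.foldl (fun s line => line.foldl pvA_step s) s).1
        (rest.foldl (fun s son => son.foldl (fun s line => line.foldl pvA_step s) s)
          (son.foldl (fun s line => line.foldl pvA_step s) s)).1 :=
      pvExt_foldl_sons rest _
    have hnl1 : (son.foldl (fun s line => line.foldl pvA_step s) s).1.get? "\n" = some 0 :=
      pvExt_foldl_son son s _ _ hnl
    simp only [List.foldl_cons, pvB_sonnet son s [] _ hnl hD, List.nil_append,
      ih _ _ _ hnl1, List.flatMap_cons, List.map_cons, List.append_assoc,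
      List.singleton_append, pvA_seq_eq]

-- ===== VERDICT (by name: the statement is the Claim_ definition above) =====
theorem vectorize_sonnets_spec : Claim_equal_vectorize_sonnets := by
  intro sonnets _
  unfold Spec_vectorize_sonnets vectorize_sonnets vectorize_sonnets_alt
  have hnl : ((PySem.Dict.ofList [("\n", (0:Int))], PySem.Dict.ofList [((0:Int), "\n")], (1:Int)) : PySem.Dict String Int × PySem.Dict Int String × Int).1.get? "\n" = some 0 := rfl
  simp only [pvA_pass2, pvB_main sonnets _ [] [] hnl]
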